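-- pv_equiv track=rewrite | github.com/rekambergeraklab/pw-matrix | pw_matrix.py | group_ports
-- ===== SOURCE A (Python) =====
-- def group_ports(ports):
--     groups = {}
--     for p in ports:
--         if ':' in p:
--             node, port = p.split(':', 1)
--         else:
--             node, port = 'Misc', p
--
--         if 'midi' in node.lower() or 'midi' in port.lower():
--             continue
--
--         if node not in groups: groups[node] = []
--         groups[node].append(port)
--
--     def sort_key(item):
--         return item[0].lower()
--
--     return dict(sorted(groups.items(), key=sort_key))
-- ===== SOURCE B (Python) =====
-- def group_ports(ports):
--     # Phase 1: parse and filter into a flat list of (node, port) pairs.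
--     pairs = []
--     for p in ports:
--         if ':' in p:
--             node, port = p.split(':', 1)
--         else:
--             node, port = 'Misc', p
--         if 'midi' not in node.lower() and 'midi' not in port.lower():
--             pairs.append((node, port))
--     # Phase 2: distinct nodes in first-occurrence order, then a stable
--     # case-insensitive sort of the node names.
--     nodes = list(dict.fromkeys(node for node, _ in pairs))
--     nodes.sort(key=str.lower)
--     # Phase 3: one dict comprehension; each node collects its ports in order.
--     return {node: [port for n, port in pairs if n == node] for node in nodes}
-- ===== Notes on version B (the rewrite author's own statement) =====
-- stated objective: alternative
-- what changed: Instead of accumulating a dict inside the scan and sorting its (node, list) items at the end, B first flattens the input into a filtered list of (node, port) pairs, dedups and case-insensitively sorts just the node names, and then builds each group by filtering the pair list per node.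
import Mathlib
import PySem

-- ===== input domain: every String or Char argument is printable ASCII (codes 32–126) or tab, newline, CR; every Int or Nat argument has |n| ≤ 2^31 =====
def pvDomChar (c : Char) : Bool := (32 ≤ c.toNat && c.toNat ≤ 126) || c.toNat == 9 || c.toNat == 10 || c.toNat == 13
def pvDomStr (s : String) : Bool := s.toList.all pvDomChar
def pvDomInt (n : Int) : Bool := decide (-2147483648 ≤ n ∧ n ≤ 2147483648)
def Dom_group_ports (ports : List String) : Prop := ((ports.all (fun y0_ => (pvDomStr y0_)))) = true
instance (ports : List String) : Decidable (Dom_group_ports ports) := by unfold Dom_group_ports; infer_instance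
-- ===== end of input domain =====

-- B re-groups by a different decomposition: parse/filter to flat (node, port) pairs, dedup + case-insensitively
-- sort the node names, then build each group by filtering the pairs — no dict accumulation, no sort of items.


-- ===== PORT A =====
-- shared by both ports: the identical "':' split / 'Misc' fallback" lines of A and B
def pvParse (p : String) : String × String :=
  if PySem.Str.isIn ":" p then
    let parts := (PySem.Str.splitMax? p ":" 1).getD []
    (parts.getD 0 "", parts.getD 1 "")
  else ("Misc", p)

def pvSkip (np : String × String) : Bool :=
  PySem.Str.isIn "midi" (PySem.Str.lower np.1) || PySem.Str.isIn "midi" (PySem.Str.lower np.2)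

def group_ports (ports : List String) : List (String × List String) :=
  let groups : PySem.Dict String (List String) :=
    ports.foldl (fun groups p =>
      let np := pvParse p
      if pvSkip np then groups
      else
        let g1 := if groups.contains np.1 then groups else groups.insert np.1 []
        g1.modify np.1 [] (· ++ [np.2])) PySem.Dict.empty
  PySem.List.sorted groups.items (fun item => PySem.Str.lower item.1) false

-- ===== PORT B =====
def pvKeep (np : String × String) : Bool :=
  !PySem.Str.isIn "midi" (PySem.Str.lower np.1) && !PySem.Str.isIn "midi" (PySem.Str.lower np.2)

def group_ports_alt (ports : List String) : List (String × List String) :=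
  let pairs : List (String × String) :=
    ports.foldl (fun pairs p =>
      let np := pvParse p
      if pvKeep np then pairs ++ [np] else pairs) []
  let nodes := PySem.List.dedup (pairs.map (·.1))
  let sortedNodes := PySem.List.sorted nodes (fun n => PySem.Str.lower n) false
  sortedNodes.map (fun node => (node, (pairs.filter (fun q => q.1 == node)).map (·.2)))

-- ===== PRECONDITION & SPEC =====
def Spec_group_ports (ports : List String) (out : List (String × List String)) : Prop := out = group_ports_alt ports
instance (ports : List String) (out : List (String × List String)) : Decidable (Spec_group_ports ports out) := by unfold Spec_group_ports; infer_instance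

-- ===== CLAIM (what is proved, stated in full; the proofs are below) =====
def Claim_equal_group_ports : Prop := ∀ (ports : List String), Dom_group_ports ports → Spec_group_ports ports (group_ports ports)

-- ===== LEMMAS AND PROOFS =====

-- the flat parsed-and-filtered pair list both sides reduce to
def pvPairs (ports : List String) : List (String × String) :=
  (ports.map pvParse).filter (fun np => !pvSkip np)

theorem pvKeep_eq (np : String × String) : pvKeep np = !pvSkip np := by
  simp [pvKeep, pvSkip]

theorem B_fold_gen (ports : List String) (acc : List (String × String)) :
    ports.foldl (fun pairs p =>
      if pvKeep (pvParse p) then pairs ++ [pvParse p] else pairs) acc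
    = acc ++ pvPairs ports := by
  induction ports generalizing acc with
  | nil => simp [pvPairs]
  | cons p ports ih =>
    simp only [List.foldl_cons, pvPairs, List.map_cons, List.filter_cons]
    by_cases h : pvKeep (pvParse p)
    · have h' : (!pvSkip (pvParse p)) = true := by rw [← pvKeep_eq]; exact h
      simp only [h, if_pos, h']
      rw [ih]
      simp [pvPairs]
    · have h' : (!pvSkip (pvParse p)) = false := by rw [← pvKeep_eq]; simpa using h
      simp only [h, Bool.false_eq_true, if_false, h']
      exact ih acc

theorem A_step_eq (g : PySem.Dict String (List String)) (np : String × String) :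
    ((if g.contains np.1 then g else g.insert np.1 ([] : List String)).modify np.1 [] (· ++ [np.2]))
      = g.modify np.1 [] (· ++ [np.2]) := by
  by_cases h : g.contains np.1
  · simp [h]
  · simp only [h, if_neg, Bool.not_eq_true]
    rw [Bool.not_eq_true] at h
    simp only [PySem.Dict.modify, PySem.Dict.getD_insert_self,
      PySem.Dict.insert_insert_self, PySem.Dict.getD_of_not_contains g _ h]

theorem A_fold_gen (ports : List String) (d : PySem.Dict String (List String)) :
    ports.foldl (fun groups p =>
      if pvSkip (pvParse p) then groups
      else
        (if groups.contains (pvParse p).1 then groups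
         else groups.insert (pvParse p).1 []).modify (pvParse p).1 [] (· ++ [(pvParse p).2])) d
    = (pvPairs ports).foldl (fun d q => d.modify q.1 [] (· ++ [q.2])) d := by
  induction ports generalizing d with
  | nil => rfl
  | cons p ports ih =>
    simp only [List.foldl_cons, pvPairs, List.map_cons, List.filter_cons]
    by_cases h : pvSkip (pvParse p)
    · simp only [h, if_pos, Bool.not_true, Bool.false_eq_true, if_false]
      exact ih d
    · simp only [h, Bool.not_eq_true] at *
      simp only [Bool.not_false, if_pos, Bool.false_eq_true, if_false, List.foldl_cons]
      rw [A_step_eq d (pvParse p), ih]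
      simp [pvPairs]

-- sorting a mapped list by a key that factors through the map = mapping the sorted list
theorem insertBy_map {α β κ : Type} [LinearOrder κ] (f : α → β) (key : β → κ) (x : α) (ys : List α) :
    PySem.List.insertBy (fun a b => decide (key a < key b)) (f x) (ys.map f)
      = (PySem.List.insertBy (fun a b => decide (key (f a) < key (f b))) x ys).map f := by
  induction ys with
  | nil => rfl
  | cons y ys ih =>
    simp only [List.map_cons, PySem.List.insertBy]
    by_cases h : key (f x) < key (f y)
    · simp [h]
    · simp only [h, decide_false, Bool.false_eq_true, if_false, List.map_cons]
      rw [ih]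

theorem sorted_map {α β κ : Type} [LinearOrder κ] (f : α → β) (key : β → κ) (xs : List α) :
    PySem.List.sorted (xs.map f) key false
      = (PySem.List.sorted xs (fun x => key (f x)) false).map f := by
  rw [PySem.List.sorted_eq_foldl_insertBy, PySem.List.sorted_eq_foldl_insertBy]
  have main : ∀ (xs : List α) (acc : List α),
      (xs.map f).foldl (fun acc x => PySem.List.insertBy (fun a b => decide (key a < key b)) x acc) (acc.map f)
        = (xs.foldl (fun acc x => PySem.List.insertBy (fun a b => decide (key (f a) < key (f b))) x acc) acc).map f := by
    intro xs
    induction xs with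
    | nil => intro acc; rfl
    | cons x xs ih =>
      intro acc
      simp only [List.map_cons, List.foldl_cons]
      rw [insertBy_map f key x acc, ih]
  simpa using main xs []

-- A's result, characterised over the flat pair list
theorem group_ports_eq (ports : List String) :
    group_ports ports
      = PySem.List.sorted
          ((PySem.List.dedup ((pvPairs ports).map (·.1))).map
            (fun k => (k, ((pvPairs ports).filter (fun q => q.1 == k)).map (·.2))))
          (fun item => PySem.Str.lower item.1) false := by
  simp only [group_ports]
  rw [A_fold_gen]
  congr 1
  have hnd : (((pvPairs ports).foldl (fun d q => d.modify q.1 [] (· ++ [q.2])) PySem.Dict.empty)).keys.Nodup := by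
    exact PySem.Dict.nodup_keys_foldl_modify_key (pvPairs ports) (·.1) [] (fun _ q old => old ++ [q.2])
      PySem.Dict.empty (by simp)
  rw [PySem.Dict.items_eq_map_keys _ hnd []]
  have hkeys : (((pvPairs ports).foldl (fun d q => d.modify q.1 [] (· ++ [q.2])) PySem.Dict.empty)).keys
      = PySem.List.dedup ((pvPairs ports).map (·.1)) := by
    rw [PySem.Dict.keys_foldl_modify_key (pvPairs ports) (·.1) [] (fun _ q old => old ++ [q.2])]
    simp [PySem.List.dedup_eq_ofList, PySem.Set.update_nil_left]
  rw [hkeys]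
  refine List.map_congr_left ?_
  intro k _
  rw [PySem.Dict.getD_foldl_modify_append (pvPairs ports) PySem.Dict.empty k]
  simp

-- ===== VERDICT (by name: the statement is the Claim_ definition above) =====
theorem group_ports_spec : Claim_equal_group_ports := by
  intro ports _
  show group_ports ports = group_ports_alt ports
  rw [group_ports_eq]
  simp only [group_ports_alt]
  rw [B_fold_gen, List.nil_append]
  rw [sorted_map (fun k => (k, ((pvPairs ports).filter (fun q => q.1 == k)).map (·.2)))
    (fun item => PySem.Str.lower item.1)]
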